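-- pv_equiv track=rewrite | github.com/Manitary/advent-of-code | 2022/python/day07.py | get_folder_structure
-- ===== SOURCE A (Python) =====
-- ROOT_FOLDER = 'home'
--
-- def path_level_to_string(path: list[str], level: int) -> str:
--     """Return the full path up to the given level."""
--     return f"{'/'.join(path[:level + 1])}/"
--
-- def path_to_string(path: list[str], item: str) -> str:
--     """Return the full path of an item (file or folder) inside the given path."""
--     return f"{'/'.join(path)}/{item}/"
--
-- def get_folder_structure(commands: list[str]) -> dict[str, int]:
--     """
--     Given a list of commands to traverse the filesystem,
--     return a dictionary of folder paths and their size.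
--     """
--     current_path = [ROOT_FOLDER]
--     directories = {f"{ROOT_FOLDER}/": 0}
--     for command in commands:
--         match command.split():
--             case ['$', 'cd', '/']:
--                 current_path = current_path[:1]
--             case ['$', 'cd', '..']:
--                 current_path.pop()
--             case ['$', 'cd', folder_name]:
--                 if path_to_string(current_path, folder_name) in directories:
--                     current_path.append(folder_name)
--             case ['$', 'ls']:
--                 continue
--             case ['dir', folder_name]:
--                 directories[path_to_string(current_path, folder_name)] = 0
--             case [file_size, _]:
--                 for i, _ in enumerate(current_path):
--                     directories[path_level_to_string(current_path, i)] += int(file_size)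
--
--     return directories
-- ===== SOURCE B (Python) =====
-- ROOT_FOLDER = 'home'
--
-- def get_folder_structure(commands: list[str]) -> dict[str, int]:
--     """
--     Same result as A, but without the per-file walk over all ancestors:
--     each file size is added once to the pending total of the deepest folder,
--     and a folder's pending total is propagated to its parent exactly once,
--     when the folder is left (plus one final flush at the end).
--     """
--     current_path = [ROOT_FOLDER]
--     pending = [0]  # pending[i] = size gathered for current_path[:i+1], not yet in directories
--     directories = {f"{ROOT_FOLDER}/": 0}
--
--     def close_top():
--         size = pending.pop()
--         if size:
--             directories[f"{'/'.join(current_path)}/"] += size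
--         current_path.pop()
--         if pending:
--             pending[-1] += size
--
--     for command in commands:
--         match command.split():
--             case ['$', 'cd', '/']:
--                 while len(pending) > 1:
--                     close_top()
--             case ['$', 'cd', '..']:
--                 close_top()
--             case ['$', 'cd', folder_name]:
--                 if f"{'/'.join(current_path)}/{folder_name}/" in directories:
--                     current_path.append(folder_name)
--                     pending.append(0)
--             case ['$', 'ls']:
--                 continue
--             case ['dir', folder_name]:
--                 directories[f"{'/'.join(current_path)}/{folder_name}/"] = 0
--             case [file_size, _]:
--                 if pending:
--                     pending[-1] += int(file_size)
--     while pending: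
--         close_top()
--     return directories
-- ===== Notes on version B (the rewrite author's own statement) =====
-- stated objective: alternative
-- what changed: A walks every ancestor directory per file line, re-joining each ancestor path string from scratch; B keeps a stack of pending sizes parallel to the current path, adds each file size once to the deepest folder's pending total, and propagates it to the parent exactly once when the folder is left (plus one final flush), removing the per-file inner loop entirely.
import Mathlib
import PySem

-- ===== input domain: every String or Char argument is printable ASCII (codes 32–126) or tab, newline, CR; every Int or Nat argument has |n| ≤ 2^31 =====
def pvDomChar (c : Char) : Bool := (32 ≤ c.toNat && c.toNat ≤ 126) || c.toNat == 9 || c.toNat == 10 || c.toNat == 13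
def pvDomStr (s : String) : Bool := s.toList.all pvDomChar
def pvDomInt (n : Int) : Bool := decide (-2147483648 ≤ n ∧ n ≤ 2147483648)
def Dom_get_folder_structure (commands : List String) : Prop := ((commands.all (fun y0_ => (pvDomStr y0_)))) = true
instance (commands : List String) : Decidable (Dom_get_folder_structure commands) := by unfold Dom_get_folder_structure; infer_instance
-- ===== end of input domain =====

-- B replaces A's per-file walk over every ancestor directory (re-joining each ancestor path
-- string from scratch) by a parallel stack of pending sizes: a file size is added once to the
-- deepest folder's pending total, which is propagated to the parent exactly once, when the
-- folder is left (plus one final flush).  Same return value on Pre_; A mutates no argument.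

-- ===== PORT A =====
def ROOT_FOLDER : String := "home"

def path_level_to_string (path : List String) (level : Int) : String :=
  PySem.Str.join "/" (PySem.List.slice path none (some (level + 1))) ++ "/"

def path_to_string (path : List String) (item : String) : String :=
  PySem.Str.join "/" path ++ "/" ++ item ++ "/"

-- Python's match with literal patterns is transliterated as the corresponding equality
-- tests on the split command, in the same case order; exact on every input.
def stepA (st : List String × PySem.Dict String Int) (command : String) :
    List String × PySem.Dict String Int :=
  match PySem.Str.split₀ command with
  | [a, b, folder_name] =>
      if a = "$" ∧ b = "cd" then
        if folder_name = "/" then (PySem.List.slice st.1 none (some 1), st.2)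
        else if folder_name = ".." then (st.1.dropLast, st.2)
          -- current_path.pop(): IndexError on an empty path — such inputs are outside Pre_
        else if st.2.contains (path_to_string st.1 folder_name) then
          (st.1 ++ [folder_name], st.2)
        else st
      else st
  | [file_size, b] =>
      if file_size = "$" ∧ b = "ls" then st
      else if file_size = "dir" then (st.1, st.2.insert (path_to_string st.1 b) 0)
      else
        -- int(file_size): none = ValueError, and directories[...] += n: KeyError if a level
        -- key is absent — both only happen outside Pre_, where modify's default 0 is unused.
        let n := (PySem.Int.ofStr? file_size).getD 0
        (st.1, (PySem.List.enumerate st.1).foldl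
          (fun d iv => d.modify (path_level_to_string st.1 iv.1) 0 (· + n)) st.2)
  | _ => st

def get_folder_structure (commands : List String) : List (String × Int) :=
  (commands.foldl stepA ([ROOT_FOLDER], PySem.Dict.ofList [(ROOT_FOLDER ++ "/", 0)])).2.items

-- ===== PORT B =====
-- B's state is (current_path, pending, directories).  Python keeps the top of `pending` at
-- the END of its list; here the list is head-first (stack[-1] is the head), a pure
-- representation choice.  `bump l s` is Python's 'if pending: pending[-1] += size'.

def bump (pend : List Int) (s : Int) : List Int :=
  match pend with
  | [] => []
  | x :: rest => (x + s) :: rest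

-- close_top(): pop the deepest pending size; if nonzero, account it to the deepest folder's
-- key; pop the path component; add the size to the parent's pending total.
-- (pending.pop() on an empty list raises IndexError in Python — outside Pre_.)
def close_top (st : List String × List Int × PySem.Dict String Int) :
    List String × List Int × PySem.Dict String Int :=
  match st.2.1 with
  | [] => st
  | size :: rest =>
      (st.1.dropLast, bump rest size,
        if size ≠ 0 then
          st.2.2.modify (PySem.Str.join "/" st.1 ++ "/") 0 (· + size)
        else st.2.2)

-- while len(pending) > 1: close_top()
def pop_to_root (st : List String × List Int × PySem.Dict String Int) :
    List String × List Int × PySem.Dict String Int :=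
  match h : st.2.1 with
  | size :: rest₀ :: rest =>
      pop_to_root (st.1.dropLast, bump (rest₀ :: rest) size,
        if size ≠ 0 then
          st.2.2.modify (PySem.Str.join "/" st.1 ++ "/") 0 (· + size)
        else st.2.2)
  | _ => st
termination_by st.2.1.length
decreasing_by simp [h, bump]

-- while pending: close_top()
def flush_all (st : List String × List Int × PySem.Dict String Int) :
    List String × List Int × PySem.Dict String Int :=
  match h : st.2.1 with
  | [] => st
  | size :: rest =>
      flush_all (st.1.dropLast, bump rest size,
        if size ≠ 0 then
          st.2.2.modify (PySem.Str.join "/" st.1 ++ "/") 0 (· + size)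
        else st.2.2)
termination_by st.2.1.length
decreasing_by cases rest <;> simp [h, bump]

def stepB (st : List String × List Int × PySem.Dict String Int) (command : String) :
    List String × List Int × PySem.Dict String Int :=
  match PySem.Str.split₀ command with
  | [a, b, folder_name] =>
      if a = "$" ∧ b = "cd" then
        if folder_name = "/" then pop_to_root st
        else if folder_name = ".." then close_top st
        else if st.2.2.contains (PySem.Str.join "/" st.1 ++ "/" ++ folder_name ++ "/") then
          (st.1 ++ [folder_name], 0 :: st.2.1, st.2.2)
        else st
      else st
  | [file_size, b] =>
      if file_size = "$" ∧ b = "ls" then st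
      else if file_size = "dir" then
        (st.1, st.2.1, st.2.2.insert (PySem.Str.join "/" st.1 ++ "/" ++ b ++ "/") 0)
      else (st.1, bump st.2.1 ((PySem.Int.ofStr? file_size).getD 0), st.2.2)
  | _ => st

def get_folder_structure_alt (commands : List String) : List (String × Int) :=
  (flush_all (commands.foldl stepB
    ([ROOT_FOLDER], [0], PySem.Dict.ofList [(ROOT_FOLDER ++ "/", 0)]))).2.2.items

-- ===== PRECONDITION & SPEC =====
-- spec-side path keys (independent of the ports): pvK p = '/'.join(p) + '/',
-- pvLevelKeys p = the keys of all levels of the path p, shallowest first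
def pvK (path : List String) : String := PySem.Str.join "/" path ++ "/"
def pvLevelKeys (path : List String) : List String :=
  (List.range path.length).map (fun (i : Nat) => pvK (path.take (i + 1)))

-- Pre_ holds exactly on the inputs where the Python A RETURNS (it excludes nothing A returns
-- on): it walks the commands keeping only the path and the list of declared folder keys — no
-- sizes, no dictionary values — and fails exactly where A raises: IndexError ('$ cd ..' on an
-- already-empty path), and on a file line reached with a nonempty path, ValueError (size not
-- an int literal) or KeyError (some ancestor key undeclared).
def preStep (st : List String × List String) (c : String) :
    Option (List String × List String) :=
  match PySem.Str.split₀ c with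
  | [x, y, z] =>
      if x = "$" ∧ y = "cd" then
        if z = "/" then some (st.1.take 1, st.2)
        else if z = ".." then (if st.1 = [] then none else some (st.1.dropLast, st.2))
        else if st.2.contains (pvK st.1 ++ z ++ "/") then some (st.1 ++ [z], st.2)
        else some st
      else some st
  | [x, y] =>
      if x = "$" ∧ y = "ls" then some st
      else if x = "dir" then
        some (st.1, if st.2.contains (pvK st.1 ++ y ++ "/") then st.2
          else st.2 ++ [pvK st.1 ++ y ++ "/"])
      else if st.1 = [] then some st
      else if (PySem.Int.ofStr? x).isSome ∧ (pvLevelKeys st.1).all (st.2.contains ·) then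
        some st
      else none
  | _ => some st

def preRun (st : List String × List String) : List String → Option (List String × List String)
  | [] => some st
  | c :: r => match preStep st c with
    | some st' => preRun st' r
    | none => none

def Pre_get_folder_structure (commands : List String) : Prop :=
  (preRun (["home"], ["home/"]) commands).isSome = true

instance (commands : List String) : Decidable (Pre_get_folder_structure commands) := by
  unfold Pre_get_folder_structure; infer_instance

def pvWitness_get_folder_structure : List String :=
  ["$ ls", "dir a", "100 b.txt", "$ cd a", "200 c.txt", "$ cd ..", "dir d", "$ cd d",
   "7 e.txt", "$ cd /", "junk one two three", ""]

def Spec_get_folder_structure (commands : List String) (out : List (String × Int)) : Prop :=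
  out = get_folder_structure_alt commands
instance (commands : List String) (out : List (String × Int)) :
    Decidable (Spec_get_folder_structure commands out) := by
  unfold Spec_get_folder_structure; infer_instance

-- ===== CLAIM (what is proved, stated in full; the proofs are below) =====
def Claim_equal_get_folder_structure : Prop :=
  ∀ (commands : List String), Dom_get_folder_structure commands →
    Pre_get_folder_structure commands →
    Spec_get_folder_structure commands (get_folder_structure commands)

-- ===== LEMMAS AND PROOFS =====

@[simp] theorem pv_length_bump (pend : List Int) (s : Int) :
    (bump pend s).length = pend.length := by
  cases pend <;> rfl

-- pending sizes: walking the pending stack from the top, the accumulated total at the first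
-- occurrence of key k (0 if k is not on the stack) — exactly what flushing will still add
-- to k's directory entry.
def pendOf : Int → List (String × Int) → String → Int
  | _, [], _ => 0
  | acc, (p, s) :: rest, k => if k = p then acc + s else pendOf (acc + s) rest k

-- B's pending stack paired with the level keys it belongs to, deepest first
def pvStack (path : List String) (pend : List Int) : List (String × Int) :=
  ((pvLevelKeys path).reverse).zip pend

theorem pv_pendOf_not_mem (k : String) :
    ∀ (l : List (String × Int)) (acc : Int), k ∉ l.map Prod.fst → pendOf acc l k = 0 := by
  intro l
  induction l with
  | nil => intro acc _; rfl
  | cons a t ih =>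
    intro acc h
    obtain ⟨p, s⟩ := a
    simp only [List.map_cons, List.mem_cons] at h
    push Not at h
    simp only [pendOf, if_neg h.1]
    exact ih _ h.2

theorem pv_pendOf_add (k : String) :
    ∀ (l : List (String × Int)) (acc t : Int),
      pendOf (acc + t) l k = pendOf acc l k + (if k ∈ l.map Prod.fst then t else 0) := by
  intro l
  induction l with
  | nil => intro acc t; simp [pendOf]
  | cons a r ih =>
    intro acc t
    obtain ⟨p, s⟩ := a
    by_cases hk : k = p
    · subst hk; simp [pendOf]; ring
    · simp only [pendOf, if_neg hk, List.map_cons, List.mem_cons]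
      rw [show acc + t + s = acc + s + t by ring, ih]
      by_cases hm : k ∈ r.map Prod.fst <;> simp [hm, hk]

def bumpP (stack : List (String × Int)) (size : Int) : List (String × Int) :=
  match stack with
  | [] => []
  | (parent, parent_size) :: rr => (parent, parent_size + size) :: rr

theorem pv_pend_bump (k : String) :
    ∀ (rest : List (String × Int)) (acc s : Int),
      pendOf acc (bumpP rest s) k = pendOf (acc + s) rest k := by
  intro rest acc s
  cases rest with
  | nil => simp [bumpP, pendOf]
  | cons a r =>
    obtain ⟨q, t⟩ := a
    simp only [bumpP, pendOf]
    by_cases hk : k = q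
    · simp only [if_pos hk]; ring
    · simp only [if_neg hk]
      congr 1
      ring

theorem pv_map_fst_bumpP (l : List (String × Int)) (s : Int) :
    (bumpP l s).map Prod.fst = l.map Prod.fst := by
  cases l with
  | nil => rfl
  | cons a t => cases a; rfl

theorem pv_zip_bump (l : List String) (m : List Int) (s : Int) :
    l.zip (bump m s) = bumpP (l.zip m) s := by
  cases l with
  | nil => simp [bumpP]
  | cons a t =>
    cases m with
    | nil => simp [bump, bumpP]
    | cons x r => simp [bump, bumpP]

-- strings
theorem pv_chars_join_append (sep : List Char) (x : List Char) :
    ∀ (l : List (List Char)), l ≠ [] →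
      PySem.Chars.join sep (l ++ [x]) = PySem.Chars.join sep l ++ sep ++ x := by
  intro l
  induction l with
  | nil => intro h; cases h rfl
  | cons a t ih =>
    intro _
    cases t with
    | nil => simp [PySem.Chars.join, List.intercalate]
    | cons b t2 =>
      simp only [PySem.Chars.join, List.intercalate] at ih ⊢
      simp only [List.cons_append, List.intersperse_cons₂, List.flatten_cons] at ih ⊢
      rw [ih (by simp)]
      simp [List.append_assoc]

theorem pv_join_append (l : List String) (x : String) (h : l ≠ []) :
    PySem.Str.join "/" (l ++ [x]) = PySem.Str.join "/" l ++ "/" ++ x := by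
  apply String.ext
  simp only [PySem.Str.toList_join, String.toList_append, List.map_append, List.map_cons,
    List.map_nil]
  exact pv_chars_join_append _ _ _ (by simpa using h)

theorem pv_pts (path : List String) (x : String) :
    path_to_string path x = pvK path ++ x ++ "/" := rfl

theorem pv_pvK_append (path : List String) (x : String) (h : path ≠ []) :
    pvK (path ++ [x]) = pvK path ++ x ++ "/" := by
  unfold pvK
  rw [pv_join_append path x h]

theorem pv_len_append3 (a b : String) :
    (a ++ b ++ "/").toList.length = a.toList.length + b.toList.length + 1 := by
  simp; omega

theorem pv_plts (path : List String) (i : Nat) :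
    path_level_to_string path (i : Int) = pvK (path.take (i + 1)) := by
  unfold path_level_to_string pvK
  rw [show ((i : Int) + 1) = ((i + 1 : Nat) : Int) by push_cast; ring]
  rw [PySem.List.slice_to_natCast]

theorem pv_levelKeys_length (path : List String) :
    (pvLevelKeys path).length = path.length := by
  simp [pvLevelKeys]

theorem pv_levelKeys_append (path : List String) (x : String) :
    pvLevelKeys (path ++ [x]) = pvLevelKeys path ++ [pvK (path ++ [x])] := by
  unfold pvLevelKeys
  rw [List.length_append, List.length_cons, List.length_nil, List.range_succ, List.map_append]
  have h1 : (List.range path.length).map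
      (fun (i : Nat) => pvK ((path ++ [x]).take (i + 1))) =
      (List.range path.length).map (fun (i : Nat) => pvK (path.take (i + 1))) := by
    apply List.map_congr_left
    intro i hi
    rw [List.mem_range] at hi
    rw [List.take_append_of_le_length (by omega)]
  have h2 : pvK ((path ++ [x]).take (path.length + 0 + 1)) = pvK (path ++ [x]) := by
    rw [List.take_of_length_le (by simp)]
  rw [h1, List.map_cons, List.map_nil, h2]

theorem pv_rev_levelKeys_cons (path : List String) (h : path ≠ []) :
    (pvLevelKeys path).reverse = pvK path :: (pvLevelKeys path.dropLast).reverse := by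
  obtain ⟨q, x, rfl⟩ : ∃ q x, path = q ++ [x] :=
    ⟨path.dropLast, path.getLast h, (List.dropLast_concat_getLast h).symm⟩
  rw [show (q ++ [x]).dropLast = q from List.dropLast_concat]
  rw [pv_levelKeys_append, List.reverse_append]
  rfl

theorem pv_pvK_len_lt (s : List String) (x : String) (h : s ≠ []) :
    (pvK s).toList.length < (pvK (s ++ [x])).toList.length := by
  rw [pv_pvK_append s x h, pv_len_append3]
  omega

-- the level keys strictly lengthen with depth, hence are pairwise distinct
theorem pv_levelKeys_pairwise (path : List String) :
    (pvLevelKeys path).Pairwise (fun a b => a.toList.length < b.toList.length) := by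
  have hstep : ∀ i : Nat, i + 1 < path.length →
      (pvK (path.take (i + 1))).toList.length < (pvK (path.take (i + 2))).toList.length := by
    intro i hi
    have h1 : path.take (i + 2) = path.take (i + 1) ++ [path[i + 1]] := by
      rw [List.take_succ, List.getElem?_eq_getElem hi]
      rfl
    rw [h1]
    have hlt : 0 < (path.take (i + 1)).length := by
      rw [List.length_take]
      omega
    exact pv_pvK_len_lt _ _ (List.length_pos_iff.mp hlt)
  have hmono : ∀ i j : Nat, i < j → j < path.length →
      (pvK (path.take (i + 1))).toList.length < (pvK (path.take (j + 1))).toList.length := by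
    intro i j hij hj
    induction j with
    | zero => omega
    | succ m ihm =>
      rcases Nat.lt_or_ge i m with hlt | hge
      · exact lt_trans (ihm hlt (by omega)) (hstep m (by omega))
      · have : i = m := by omega
        subst this
        exact hstep i (by omega)
  unfold pvLevelKeys
  rw [List.pairwise_iff_getElem]
  intro i j hi hj hij
  simp only [List.getElem_map, List.getElem_range] at *
  exact hmono i j hij (by simpa using hj)

theorem pv_rev_pairwise (path : List String) :
    ((pvLevelKeys path).reverse).Pairwise (fun a b => b.toList.length < a.toList.length) := by
  rw [List.pairwise_reverse]
  exact pv_levelKeys_pairwise path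

theorem pv_longer_not_mem (a q : String) (l : List String)
    (hpw : (a :: l).Pairwise (fun x y => y.toList.length < x.toList.length))
    (hq : a.toList.length < q.toList.length) : q ∉ a :: l := by
  intro hmem
  rcases List.mem_cons.mp hmem with h | h
  · subst h; omega
  · have := (List.pairwise_cons.mp hpw).1 q h
    omega

theorem pv_contains_keys (d : PySem.Dict String Int) (k : String) :
    d.contains k = (d.keys).contains k := by
  cases hc : (d.keys).contains k
  · cases hc2 : d.contains k
    · rfl
    · exfalso
      have := (PySem.Dict.contains_iff_mem_keys d k).mp hc2
      rw [← List.contains_iff_mem] at this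
      rw [this] at hc
      cases hc
  · exact (PySem.Dict.contains_iff_mem_keys d k).mpr (by
      rw [← List.contains_iff_mem]; exact hc)

-- dict folds (A's file case)
theorem pv_fold_modify_getD {α : Type} (f : α → String) (n : Int) :
    ∀ (l : List α) (d : PySem.Dict String Int) (k : String),
      (l.foldl (fun d x => d.modify (f x) 0 (· + n)) d).getD k 0 =
        d.getD k 0 + n * ((l.map f).count k) := by
  intro l
  induction l with
  | nil => intro d k; simp
  | cons a t ih =>
    intro d k
    simp only [List.foldl_cons, List.map_cons, List.count_cons]
    rw [ih, PySem.Dict.getD_modify]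
    by_cases hk : k = f a
    · rw [if_pos hk, if_pos (beq_iff_eq.mpr hk.symm)]
      subst hk
      push_cast
      ring
    · rw [if_neg hk, if_neg (by simp [Ne.symm hk])]
      push_cast
      ring

theorem pv_fold_modify_keys {α : Type} (f : α → String) (n : Int) :
    ∀ (l : List α) (d : PySem.Dict String Int),
      (∀ x ∈ l, d.contains (f x) = true) →
      (l.foldl (fun d x => d.modify (f x) 0 (· + n)) d).keys = d.keys := by
  intro l
  induction l with
  | nil => intro d _; rfl
  | cons a t ih =>
    intro d h
    simp only [List.foldl_cons]
    rw [ih]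
    · rw [PySem.Dict.keys_modify, PySem.Dict.keys_insert_of_contains _ _ (h a List.mem_cons_self)]
    · intro x hx
      rw [PySem.Dict.contains_modify]
      simp [h x (List.mem_cons_of_mem _ hx)]

theorem pv_enum_fst {α : Type} :
    ∀ (l : List α) (s : Int),
      (PySem.List.enumerate l s).map Prod.fst =
        (List.range l.length).map (fun (i : Nat) => s + (i : Int)) := by
  intro l
  induction l with
  | nil => intro s; rfl
  | cons a t ih =>
    intro s
    simp only [PySem.List.enumerate, List.map_cons, List.length_cons, List.range_succ_eq_map, ih]
    rw [List.map_map]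
    refine List.cons_eq_cons.mpr ⟨by simp, ?_⟩
    apply List.map_congr_left
    intro i _
    simp only [Function.comp_apply]
    push_cast
    ring

-- the invariant tying A's state (path, d) to B's state (path, pend, d')
structure PVInv (path : List String) (d d' : PySem.Dict String Int)
    (pend : List Int) : Prop where
  hlen : pend.length = path.length
  hkeys : d.keys = d'.keys
  hnd : d'.keys.Nodup
  hnz : ∀ k ∈ (pvStack path pend).map Prod.fst,
    pendOf 0 (pvStack path pend) k ≠ 0 → k ∈ d'.keys
  hval : ∀ k, d.getD k 0 = d'.getD k 0 + pendOf 0 (pvStack path pend) k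

theorem pv_stack_map_fst (path : List String) (pend : List Int)
    (hlen : pend.length = path.length) :
    (pvStack path pend).map Prod.fst = (pvLevelKeys path).reverse := by
  unfold pvStack
  rw [List.map_fst_zip]
  rw [List.length_reverse, pv_levelKeys_length, hlen]

theorem pv_stack_cons (path : List String) (s : Int) (rest : List Int) (h : path ≠ []) :
    pvStack path (s :: rest) = (pvK path, s) :: pvStack path.dropLast rest := by
  unfold pvStack
  rw [pv_rev_levelKeys_cons path h]
  rfl

theorem pv_flush_spec :
    ∀ (pend : List Int) (path : List String) (d' : PySem.Dict String Int),
      pend.length = path.length → d'.keys.Nodup →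
      (∀ k ∈ (pvStack path pend).map Prod.fst,
        pendOf 0 (pvStack path pend) k ≠ 0 → k ∈ d'.keys) →
      (flush_all (path, pend, d')).2.2.keys = d'.keys ∧
      (∀ k, (flush_all (path, pend, d')).2.2.getD k 0 =
        d'.getD k 0 + pendOf 0 (pvStack path pend) k) := by
  intro pend
  induction hn : pend.length using Nat.strong_induction_on generalizing pend with
  | _ n ih =>
  intro path d' hlen hnd hnz
  match pend, hn with
  | [], hn =>
    rw [flush_all]
    exact ⟨rfl, fun k => by simp [pvStack, pendOf]⟩
  | s :: rest, hn =>
    have hlenc : (s :: rest).length = path.length := hn.trans hlen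
    have hne : path ≠ [] := by
      intro h0; subst h0; simp at hlenc
    have hcons := pv_stack_cons path s rest hne
    have hrevc := pv_rev_levelKeys_cons path hne
    have hpwc : (pvK path :: (pvLevelKeys path.dropLast).reverse).Pairwise
        (fun a b => b.toList.length < a.toList.length) := by
      rw [← hrevc]; exact pv_rev_pairwise path
    have hlen' : rest.length = path.dropLast.length := by
      simp at hlenc ⊢; omega
    have hmap' : (pvStack path.dropLast rest).map Prod.fst =
        (pvLevelKeys path.dropLast).reverse := pv_stack_map_fst _ _ hlen'
    have hnotmem : ∀ k ∈ (pvStack path.dropLast rest).map Prod.fst, k ≠ pvK path := by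
      intro k hk
      rw [hmap'] at hk
      intro he
      subst he
      have := (List.pairwise_cons.mp hpwc).1 _ hk
      omega
    have hd'' : (if s ≠ 0 then
        d'.modify (pvK path) 0 (· + s)
        else d').keys = d'.keys := by
      by_cases hs : s = 0
      · simp [hs]
      · rw [if_pos hs, PySem.Dict.keys_modify,
          PySem.Dict.keys_insert_of_contains]
        rw [PySem.Dict.contains_iff_mem_keys]
        apply hnz (pvK path)
        · rw [pv_stack_map_fst _ _ hlenc, hrevc]; exact List.mem_cons_self
        · rw [hcons]
          simp only [pendOf, if_pos rfl, zero_add]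
          exact hs
    have hstep : flush_all (path, s :: rest, d') =
        flush_all (path.dropLast, bump rest s,
          if s ≠ 0 then
            d'.modify (pvK path) 0 (· + s)
          else d') := by
      rw [flush_all]
      rfl
    have hzip : pvStack path.dropLast (bump rest s) = bumpP (pvStack path.dropLast rest) s := by
      unfold pvStack
      exact pv_zip_bump _ _ _
    obtain ⟨ihk, ihv⟩ := ih ((bump rest s).length) (by simp at hn ⊢; omega)
      (bump rest s) rfl path.dropLast
      (if s ≠ 0 then
        d'.modify (pvK path) 0 (· + s)
        else d')
      (by simpa using hlen')
      (by rw [hd'']; exact hnd)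
      (by
        intro k hk hpend
        rw [hzip, pv_map_fst_bumpP] at hk
        rw [hzip, pv_pend_bump, zero_add] at hpend
        rw [hd'']
        apply hnz k
        · rw [pv_stack_map_fst _ _ hlenc, hrevc, ← hmap']
          exact List.mem_cons_of_mem _ hk
        · rw [hcons]
          simp only [pendOf, if_neg (hnotmem k hk), zero_add]
          exact hpend)
    rw [hstep]
    refine ⟨by rw [ihk, hd''], ?_⟩
    intro k
    rw [ihv k, hzip, pv_pend_bump, zero_add, hcons]
    by_cases hk : k = pvK path
    · subst hk
      simp only [pendOf, if_pos rfl, zero_add]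
      rw [pv_pendOf_not_mem _ _ _ (fun hm => (hnotmem _ hm) rfl)]
      by_cases hs : s = 0
      · simp [hs]
      · rw [if_pos hs, PySem.Dict.getD_modify, if_pos rfl]
        push_cast
        simp
    · simp only [pendOf, if_neg hk, zero_add]
      by_cases hs : s = 0
      · simp [hs]
      · rw [if_pos hs, PySem.Dict.getD_modify, if_neg hk]

-- '$ cd /': closing down to the root keeps the dictionary keys and the combined
-- (dictionary + pending) totals, and truncates the path to its first component
theorem pv_pop_spec :
    ∀ (pend : List Int) (path : List String) (d' : PySem.Dict String Int),
      pend.length = path.length → d'.keys.Nodup →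
      (∀ k ∈ (pvStack path pend).map Prod.fst,
        pendOf 0 (pvStack path pend) k ≠ 0 → k ∈ d'.keys) →
      (pop_to_root (path, pend, d')).1 = path.take 1 ∧
      (pop_to_root (path, pend, d')).2.1.length = (pop_to_root (path, pend, d')).1.length ∧
      (pop_to_root (path, pend, d')).2.2.keys = d'.keys ∧
      (∀ k, (pop_to_root (path, pend, d')).2.2.getD k 0 +
          pendOf 0 (pvStack (pop_to_root (path, pend, d')).1
            (pop_to_root (path, pend, d')).2.1) k =
        d'.getD k 0 + pendOf 0 (pvStack path pend) k) ∧
      (∀ k ∈ (pvStack (pop_to_root (path, pend, d')).1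
          (pop_to_root (path, pend, d')).2.1).map Prod.fst,
        pendOf 0 (pvStack (pop_to_root (path, pend, d')).1
          (pop_to_root (path, pend, d')).2.1) k =
            pendOf 0 (pvStack path pend) k ∧ k ∈ (pvStack path pend).map Prod.fst) := by
  intro pend
  induction hn : pend.length using Nat.strong_induction_on generalizing pend with
  | _ n ih =>
  intro path d' hlen hnd hnz
  match pend, hn with
  | [], hn =>
    have hp : path = [] := List.length_eq_zero_iff.mp (by simp at hn; omega)
    subst hp
    rw [show pop_to_root (([] : List String), ([] : List Int), d') = ([], [], d') by
      rw [pop_to_root]]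
    exact ⟨rfl, rfl, rfl, fun k => rfl, fun k hk => ⟨rfl, hk⟩⟩
  | [s], hn =>
      have hp1 : path.take 1 = path := List.take_of_length_le (by simp at hn; omega)
      rw [show pop_to_root (path, [s], d') = (path, [s], d') by rw [pop_to_root]]
      exact ⟨hp1.symm, by simp at hn ⊢; omega, rfl, fun k => rfl, fun k hk => ⟨rfl, hk⟩⟩
  | s :: s1 :: rest1, hn =>
      have hlenc : (s :: s1 :: rest1).length = path.length := hn.trans hlen
      have hne : path ≠ [] := by
        intro h0; subst h0; simp at hlenc
      have hcons := pv_stack_cons path s (s1 :: rest1) hne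
      have hrevc := pv_rev_levelKeys_cons path hne
      have hpwc : (pvK path :: (pvLevelKeys path.dropLast).reverse).Pairwise
          (fun a b => b.toList.length < a.toList.length) := by
        rw [← hrevc]; exact pv_rev_pairwise path
      have hlen' : (s1 :: rest1).length = path.dropLast.length := by
        simp at hlenc ⊢; omega
      have hmap' : (pvStack path.dropLast (s1 :: rest1)).map Prod.fst =
          (pvLevelKeys path.dropLast).reverse := pv_stack_map_fst _ _ hlen'
      have hnotmem : ∀ k ∈ (pvStack path.dropLast (s1 :: rest1)).map Prod.fst,
          k ≠ pvK path := by
        intro k hk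
        rw [hmap'] at hk
        intro he
        subst he
        have := (List.pairwise_cons.mp hpwc).1 _ hk
        omega
      have hd'' : (if s ≠ 0 then
          d'.modify (pvK path) 0 (· + s)
          else d').keys = d'.keys := by
        by_cases hs : s = 0
        · simp [hs]
        · rw [if_pos hs, PySem.Dict.keys_modify,
            PySem.Dict.keys_insert_of_contains]
          rw [PySem.Dict.contains_iff_mem_keys]
          apply hnz (pvK path)
          · rw [pv_stack_map_fst _ _ hlenc, hrevc]; exact List.mem_cons_self
          · rw [hcons]
            simp only [pendOf, if_pos rfl, zero_add]
            exact hs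
      have hstep : pop_to_root (path, s :: s1 :: rest1, d') =
          pop_to_root (path.dropLast, bump (s1 :: rest1) s,
            if s ≠ 0 then
              d'.modify (pvK path) 0 (· + s)
            else d') := by
        rw [pop_to_root]
        rfl
      have hzip : pvStack path.dropLast (bump (s1 :: rest1) s) =
          bumpP (pvStack path.dropLast (s1 :: rest1)) s := by
        unfold pvStack
        exact pv_zip_bump _ _ _
      have hpend_eq : ∀ k, k ≠ pvK path →
          pendOf 0 (pvStack path.dropLast (bump (s1 :: rest1) s)) k =
            pendOf 0 (pvStack path (s :: s1 :: rest1)) k := by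
        intro k hk
        rw [hzip, pv_pend_bump, zero_add, hcons]
        simp only [pendOf, if_neg hk, zero_add]
      obtain ⟨ih1, ih2, ih3, ih4, ih5⟩ := ih ((bump (s1 :: rest1) s).length)
        (by simp at hn ⊢; omega) (bump (s1 :: rest1) s) rfl path.dropLast
        (if s ≠ 0 then
          d'.modify (pvK path) 0 (· + s)
          else d')
        (by simpa using hlen')
        (by rw [hd'']; exact hnd)
        (by
          intro k hk hpend
          rw [hzip, pv_map_fst_bumpP] at hk
          rw [hpend_eq k (hnotmem k hk)] at hpend
          rw [hd'']
          apply hnz k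
          · rw [pv_stack_map_fst _ _ hlenc, hrevc, ← hmap']
            exact List.mem_cons_of_mem _ hk
          · exact hpend)
      rw [hstep]
      have htake : path.dropLast.take 1 = path.take 1 := by
        rw [List.dropLast_eq_take, List.take_take]
        congr 1
        simp at hlenc
        omega
      refine ⟨by rw [ih1, htake], ih2, by rw [ih3, hd''], ?_, ?_⟩
      · intro k
        rw [ih4 k, hzip, pv_pend_bump, zero_add, hcons]
        by_cases hk : k = pvK path
        · subst hk
          simp only [pendOf, if_pos rfl, zero_add]
          rw [pv_pendOf_not_mem _ _ _ (fun hm => (hnotmem _ hm) rfl)]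
          by_cases hs : s = 0
          · simp [hs]
          · rw [if_pos hs, PySem.Dict.getD_modify, if_pos rfl]
            push_cast
            simp
        · simp only [pendOf, if_neg hk, zero_add]
          by_cases hs : s = 0
          · simp [hs]
          · rw [if_pos hs, PySem.Dict.getD_modify, if_neg hk]
      · intro k hk
        obtain ⟨he, hm⟩ := ih5 k hk
        rw [hzip, pv_map_fst_bumpP] at hm
        have hkne : k ≠ pvK path := hnotmem k hm
        refine ⟨by rw [he, hpend_eq k hkne], ?_⟩
        rw [pv_stack_map_fst _ _ hlenc, hrevc, ← hmap']
        exact List.mem_cons_of_mem _ hm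

-- reduction equations for the three step functions, one per command shape
theorem pv_stepA_nil (c : String) (st : List String × PySem.Dict String Int)
    (h : PySem.Str.split₀ c = []) : stepA st c = st := by
  unfold stepA; rw [h]
theorem pv_stepB_nil (c : String) (st : List String × List Int × PySem.Dict String Int)
    (h : PySem.Str.split₀ c = []) : stepB st c = st := by
  unfold stepB; rw [h]
theorem pv_pre_nil (c : String) (st : List String × List String)
    (h : PySem.Str.split₀ c = []) : preStep st c = some st := by
  unfold preStep; rw [h]
theorem pv_stepA_one (c x : String) (st : List String × PySem.Dict String Int)
    (h : PySem.Str.split₀ c = [x]) : stepA st c = st := by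
  unfold stepA; rw [h]
theorem pv_stepB_one (c x : String) (st : List String × List Int × PySem.Dict String Int)
    (h : PySem.Str.split₀ c = [x]) : stepB st c = st := by
  unfold stepB; rw [h]
theorem pv_pre_one (c x : String) (st : List String × List String)
    (h : PySem.Str.split₀ c = [x]) : preStep st c = some st := by
  unfold preStep; rw [h]
theorem pv_stepA_ls (c : String) (st : List String × PySem.Dict String Int)
    (h : PySem.Str.split₀ c = ["$", "ls"]) : stepA st c = st := by
  unfold stepA; rw [h]; exact if_pos ⟨rfl, rfl⟩
theorem pv_stepB_ls (c : String) (st : List String × List Int × PySem.Dict String Int)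
    (h : PySem.Str.split₀ c = ["$", "ls"]) : stepB st c = st := by
  unfold stepB; rw [h]; exact if_pos ⟨rfl, rfl⟩
theorem pv_pre_ls (c : String) (st : List String × List String)
    (h : PySem.Str.split₀ c = ["$", "ls"]) : preStep st c = some st := by
  unfold preStep; rw [h]; exact if_pos ⟨rfl, rfl⟩
theorem pv_stepA_dir (c f : String) (path : List String) (d : PySem.Dict String Int)
    (h : PySem.Str.split₀ c = ["dir", f]) :
    stepA (path, d) c = (path, d.insert (path_to_string path f) 0) := by
  unfold stepA; rw [h]; exact (if_neg (by simp)).trans (if_pos rfl)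
theorem pv_stepB_dir (c f : String) (path : List String) (pend : List Int)
    (d' : PySem.Dict String Int) (h : PySem.Str.split₀ c = ["dir", f]) :
    stepB (path, pend, d') c = (path, pend, d'.insert (path_to_string path f) 0) := by
  unfold stepB; rw [h]; exact (if_neg (by simp)).trans (if_pos rfl)
theorem pv_pre_dir (c f : String) (st : List String × List String)
    (h : PySem.Str.split₀ c = ["dir", f]) :
    preStep st c = some (st.1, if st.2.contains (pvK st.1 ++ f ++ "/") then st.2
      else st.2 ++ [pvK st.1 ++ f ++ "/"]) := by
  unfold preStep; rw [h]; exact (if_neg (by simp)).trans (if_pos rfl)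
theorem pv_stepA_file (c a b : String) (path : List String) (d : PySem.Dict String Int)
    (h : PySem.Str.split₀ c = [a, b]) (h1 : ¬(a = "$" ∧ b = "ls")) (h2 : a ≠ "dir") :
    stepA (path, d) c = (path, (PySem.List.enumerate path).foldl
      (fun dd iv => dd.modify (path_level_to_string path iv.1) 0
        (· + (PySem.Int.ofStr? a).getD 0)) d) := by
  unfold stepA; rw [h]; exact (if_neg h1).trans (if_neg h2)
theorem pv_stepB_file (c a b : String) (path : List String) (pend : List Int)
    (d' : PySem.Dict String Int) (h : PySem.Str.split₀ c = [a, b])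
    (h1 : ¬(a = "$" ∧ b = "ls")) (h2 : a ≠ "dir") :
    stepB (path, pend, d') c = (path, bump pend ((PySem.Int.ofStr? a).getD 0), d') := by
  unfold stepB; rw [h]; exact (if_neg h1).trans (if_neg h2)
theorem pv_pre_file (c a b : String) (st : List String × List String)
    (h : PySem.Str.split₀ c = [a, b]) (h1 : ¬(a = "$" ∧ b = "ls")) (h2 : a ≠ "dir") :
    preStep st c = (if st.1 = [] then some st
      else if (PySem.Int.ofStr? a).isSome ∧ (pvLevelKeys st.1).all (st.2.contains ·) then
        some st
      else none) := by
  unfold preStep; rw [h]; exact (if_neg h1).trans (if_neg h2)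
theorem pv_stepA_cdroot (c : String) (path : List String) (d : PySem.Dict String Int)
    (h : PySem.Str.split₀ c = ["$", "cd", "/"]) :
    stepA (path, d) c = (PySem.List.slice path none (some 1), d) := by
  unfold stepA; rw [h]; exact (if_pos ⟨rfl, rfl⟩).trans (if_pos rfl)
theorem pv_stepB_cdroot (c : String) (st : List String × List Int × PySem.Dict String Int)
    (h : PySem.Str.split₀ c = ["$", "cd", "/"]) : stepB st c = pop_to_root st := by
  unfold stepB; rw [h]; exact (if_pos ⟨rfl, rfl⟩).trans (if_pos rfl)
theorem pv_pre_cdroot (c : String) (st : List String × List String)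
    (h : PySem.Str.split₀ c = ["$", "cd", "/"]) :
    preStep st c = some (st.1.take 1, st.2) := by
  unfold preStep; rw [h]; exact (if_pos ⟨rfl, rfl⟩).trans (if_pos rfl)
theorem pv_stepA_cdpop (c : String) (path : List String) (d : PySem.Dict String Int)
    (h : PySem.Str.split₀ c = ["$", "cd", ".."]) :
    stepA (path, d) c = (path.dropLast, d) := by
  unfold stepA; rw [h]
  exact (if_pos ⟨rfl, rfl⟩).trans ((if_neg (by decide)).trans (if_pos rfl))
theorem pv_stepB_cdpop (c : String) (st : List String × List Int × PySem.Dict String Int)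
    (h : PySem.Str.split₀ c = ["$", "cd", ".."]) : stepB st c = close_top st := by
  unfold stepB; rw [h]
  exact (if_pos ⟨rfl, rfl⟩).trans ((if_neg (by decide)).trans (if_pos rfl))
theorem pv_pre_cdpop (c : String) (st : List String × List String)
    (h : PySem.Str.split₀ c = ["$", "cd", ".."]) :
    preStep st c = (if st.1 = [] then none else some (st.1.dropLast, st.2)) := by
  unfold preStep; rw [h]
  exact (if_pos ⟨rfl, rfl⟩).trans ((if_neg (by decide)).trans (if_pos rfl))
theorem pv_stepA_cdfold (c f : String) (path : List String) (d : PySem.Dict String Int)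
    (h : PySem.Str.split₀ c = ["$", "cd", f]) (h1 : f ≠ "/") (h2 : f ≠ "..") :
    stepA (path, d) c = if d.contains (path_to_string path f) = true
      then (path ++ [f], d) else (path, d) := by
  unfold stepA; rw [h]; exact (if_pos ⟨rfl, rfl⟩).trans ((if_neg h1).trans (if_neg h2))
theorem pv_stepB_cdfold (c f : String) (path : List String) (pend : List Int)
    (d' : PySem.Dict String Int) (h : PySem.Str.split₀ c = ["$", "cd", f])
    (h1 : f ≠ "/") (h2 : f ≠ "..") :
    stepB (path, pend, d') c = if d'.contains (path_to_string path f) = true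
      then (path ++ [f], 0 :: pend, d') else (path, pend, d') := by
  unfold stepB; rw [h]; exact (if_pos ⟨rfl, rfl⟩).trans ((if_neg h1).trans (if_neg h2))
theorem pv_pre_cdfold (c f : String) (st : List String × List String)
    (h : PySem.Str.split₀ c = ["$", "cd", f]) (h1 : f ≠ "/") (h2 : f ≠ "..") :
    preStep st c = if st.2.contains (pvK st.1 ++ f ++ "/") = true
      then some (st.1 ++ [f], st.2) else some st := by
  unfold preStep; rw [h]; exact (if_pos ⟨rfl, rfl⟩).trans ((if_neg h1).trans (if_neg h2))
theorem pv_stepA_cd3other (c x y z : String) (st : List String × PySem.Dict String Int)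
    (h : PySem.Str.split₀ c = [x, y, z]) (h1 : ¬(x = "$" ∧ y = "cd")) : stepA st c = st := by
  unfold stepA; rw [h]; exact if_neg h1
theorem pv_stepB_cd3other (c x y z : String) (st : List String × List Int × PySem.Dict String Int)
    (h : PySem.Str.split₀ c = [x, y, z]) (h1 : ¬(x = "$" ∧ y = "cd")) : stepB st c = st := by
  unfold stepB; rw [h]; exact if_neg h1
theorem pv_pre_cd3other (c x y z : String) (st : List String × List String)
    (h : PySem.Str.split₀ c = [x, y, z]) (h1 : ¬(x = "$" ∧ y = "cd")) :
    preStep st c = some st := by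
  unfold preStep; rw [h]; exact if_neg h1
theorem pv_stepA_many (c x y z w : String) (r : List String)
    (st : List String × PySem.Dict String Int)
    (h : PySem.Str.split₀ c = x :: y :: z :: w :: r) : stepA st c = st := by
  unfold stepA; rw [h]
theorem pv_stepB_many (c x y z w : String) (r : List String)
    (st : List String × List Int × PySem.Dict String Int)
    (h : PySem.Str.split₀ c = x :: y :: z :: w :: r) : stepB st c = st := by
  unfold stepB; rw [h]
theorem pv_pre_many (c x y z w : String) (r : List String) (st : List String × List String)
    (h : PySem.Str.split₀ c = x :: y :: z :: w :: r) : preStep st c = some st := by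
  unfold preStep; rw [h]

theorem pv_nodup_levelKeys (path : List String) : (pvLevelKeys path).Nodup := by
  refine (pv_levelKeys_pairwise path).imp ?_
  intro a b hlt he
  subst he
  omega

set_option maxHeartbeats 1600000 in
theorem pv_step_inv (c : String) (path : List String) (d d' : PySem.Dict String Int)
    (pend : List Int) (st' : List String × List String)
    (hpre : preStep (path, d.keys) c = some st')
    (h : PVInv path d d' pend) :
    (stepB (path, pend, d') c).1 = (stepA (path, d) c).1 ∧
    st' = ((stepA (path, d) c).1, (stepA (path, d) c).2.keys) ∧
    PVInv (stepA (path, d) c).1 (stepA (path, d) c).2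
      (stepB (path, pend, d') c).2.2 (stepB (path, pend, d') c).2.1 := by
  obtain ⟨hlen, hkeys, hnd, hnz, hval⟩ := h
  have hInv : PVInv path d d' pend := ⟨hlen, hkeys, hnd, hnz, hval⟩
  have hmapfst : (pvStack path pend).map Prod.fst = (pvLevelKeys path).reverse :=
    pv_stack_map_fst _ _ hlen
  have hcont : ∀ k, d.contains k = d'.contains k := by
    intro k
    rw [pv_contains_keys, pv_contains_keys, hkeys]
  have hcontK : ∀ k, (d.keys).contains k = d.contains k := by
    intro k
    rw [pv_contains_keys]
  rcases hsp : PySem.Str.split₀ c with _ | ⟨x, _ | ⟨y, _ | ⟨z, _ | w⟩⟩⟩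
  · rw [pv_stepA_nil c _ hsp, pv_stepB_nil c _ hsp]
    rw [pv_pre_nil c _ hsp] at hpre
    exact ⟨rfl, (Option.some_injective _ hpre).symm, hInv⟩
  · rw [pv_stepA_one c x _ hsp, pv_stepB_one c x _ hsp]
    rw [pv_pre_one c x _ hsp] at hpre
    exact ⟨rfl, (Option.some_injective _ hpre).symm, hInv⟩
  · -- two tokens
    by_cases hls : x = "$" ∧ y = "ls"
    · obtain ⟨hx, hy⟩ := hls
      subst hx hy
      rw [pv_stepA_ls c _ hsp, pv_stepB_ls c _ hsp]
      rw [pv_pre_ls c _ hsp] at hpre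
      exact ⟨rfl, (Option.some_injective _ hpre).symm, hInv⟩
    · by_cases hdir : x = "dir"
      · -- dir <name>
        subst hdir
        rw [pv_stepA_dir c y path d hsp, pv_stepB_dir c y path pend d' hsp]
        rw [pv_pre_dir c y _ hsp] at hpre
        have hq : path_to_string path y = pvK path ++ y ++ "/" := pv_pts path y
        have hnotmem : path_to_string path y ∉ (pvStack path pend).map Prod.fst := by
          rw [hmapfst, hq]
          cases hp : path with
          | nil => simp [pvLevelKeys]
          | cons p0 pt =>
            rw [← hp, pv_rev_levelKeys_cons path (by rw [hp]; simp)]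
            apply pv_longer_not_mem
            · rw [← pv_rev_levelKeys_cons path (by rw [hp]; simp)]
              exact pv_rev_pairwise path
            · rw [pv_len_append3]
              omega
        refine ⟨rfl, ?_, ?_⟩
        · -- the pre-walk's seen list tracks A's key list exactly
          have : st' = (path, if (d.keys).contains (pvK path ++ y ++ "/") then d.keys
              else d.keys ++ [pvK path ++ y ++ "/"]) := by
            exact Option.some_injective _ hpre.symm
          rw [this]
          refine Prod.ext rfl ?_
          show _ = (d.insert (path_to_string path y) 0).keys
          rw [hq]
          by_cases hc : d.contains (pvK path ++ y ++ "/") = true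
          · rw [hcontK, if_pos hc, ← hq, PySem.Dict.keys_insert_of_contains _ _ (hq ▸ hc)]
          · rw [hcontK, if_neg hc, ← hq, PySem.Dict.keys_insert_of_not_contains _ _
              (by rw [hq]; exact Bool.eq_false_iff.mpr (by simpa using hc)), hq]
        · refine ⟨hlen, ?_, PySem.Dict.nodup_keys_insert _ _ _ hnd, ?_, ?_⟩
          · by_cases hc : d'.contains (path_to_string path y) = true
            · rw [PySem.Dict.keys_insert_of_contains _ _ ((hcont _).trans hc),
                PySem.Dict.keys_insert_of_contains _ _ hc, hkeys]
            · rw [PySem.Dict.keys_insert_of_not_contains _ _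
                  (by rw [hcont]; exact Bool.eq_false_iff.mpr (by simpa using hc)),
                PySem.Dict.keys_insert_of_not_contains _ _
                  (Bool.eq_false_iff.mpr (by simpa using hc)), hkeys]
          · intro k hk hp0
            exact (PySem.Dict.mem_keys_insert _ _ _ _).mpr (Or.inr (hnz k hk hp0))
          · intro k
            rw [PySem.Dict.getD_insert, PySem.Dict.getD_insert]
            by_cases hk : k = path_to_string path y
            · rw [if_pos hk, if_pos hk, pv_pendOf_not_mem _ _ _ (hk ▸ hnotmem), add_zero]
            · rw [if_neg hk, if_neg hk]
              exact hval k
      · -- <size> <name>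
        rw [pv_stepA_file c x y path d hsp hls hdir, pv_stepB_file c x y path pend d' hsp hls hdir]
        rw [pv_pre_file c x y _ hsp hls hdir] at hpre
        by_cases hp : path = []
        · -- empty path: A's loop body never runs, B's pending stack is empty
          subst hp
          have hpend : pend = [] := List.length_eq_zero_iff.mp (by simpa using hlen)
          subst hpend
          rw [if_pos rfl] at hpre
          have hst' : st' = ([], d.keys) := Option.some_injective _ hpre.symm
          refine ⟨rfl, by rw [hst']; rfl, ?_⟩
          simpa [PySem.List.enumerate, bump, List.foldl_nil] using hInv
        · rw [if_neg hp] at hpre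
          have hcond : ((PySem.Int.ofStr? x).isSome = true) ∧
              ((pvLevelKeys path).all ((d.keys).contains ·) = true) := by
            by_cases hc : ((PySem.Int.ofStr? x).isSome = true) ∧
                ((pvLevelKeys path).all ((d.keys).contains ·) = true)
            · exact hc
            · rw [if_neg (by exact_mod_cast hc)] at hpre
              cases hpre
          have hst' : st' = (path, d.keys) := by
            rw [if_pos (by exact_mod_cast hcond)] at hpre
            exact Option.some_injective _ hpre.symm
          have hlvl : ∀ lk ∈ pvLevelKeys path, d.contains lk = true := by
            intro lk hlk
            rw [← hcontK]
            exact List.all_eq_true.mp hcond.2 lk hlk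
          have hlkmap : ((PySem.List.enumerate path).map
              (fun iv => path_level_to_string path iv.1)) = pvLevelKeys path := by
            rw [show (fun (iv : Int × String) => path_level_to_string path iv.1) =
                (fun (i : Int) => path_level_to_string path i) ∘ Prod.fst from rfl,
              ← List.map_map, pv_enum_fst, List.map_map]
            unfold pvLevelKeys
            apply List.map_congr_left
            intro i _
            simp only [Function.comp_apply, zero_add]
            exact pv_plts path i
          have hcnt : ∀ iv ∈ PySem.List.enumerate path,
              d.contains (path_level_to_string path iv.1) = true := by
            intro iv hiv
            apply hlvl
            rw [← hlkmap]
            exact List.mem_map_of_mem hiv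
          have hndlk : (pvLevelKeys path).Nodup := pv_nodup_levelKeys path
          have hzip : pvStack path (bump pend ((PySem.Int.ofStr? x).getD 0)) =
              bumpP (pvStack path pend) ((PySem.Int.ofStr? x).getD 0) := pv_zip_bump _ _ _
          refine ⟨rfl, by rw [hst', pv_fold_modify_keys _ _ _ _ hcnt], ?_⟩
          refine ⟨by simpa using hlen, by rw [pv_fold_modify_keys _ _ _ _ hcnt]; exact hkeys,
            hnd, ?_, ?_⟩
          · intro k hk _
            rw [hzip, pv_map_fst_bumpP, hmapfst] at hk
            rw [← hkeys, ← PySem.Dict.contains_iff_mem_keys]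
            exact hlvl k (List.mem_reverse.mp hk)
          · intro k
            rw [pv_fold_modify_getD, hzip, pv_pend_bump, pv_pendOf_add, hlkmap, hval k]
            by_cases hm : k ∈ pvLevelKeys path
            · rw [List.count_eq_one_of_mem hndlk hm,
                if_pos (by rw [hmapfst, List.mem_reverse]; exact hm)]
              push_cast
              ring
            · rw [List.count_eq_zero_of_not_mem hm,
                if_neg (by rw [hmapfst, List.mem_reverse]; exact hm)]
              push_cast
              ring
  · -- three tokens
    by_cases hcd : x = "$" ∧ y = "cd"
    · obtain ⟨hx, hy⟩ := hcd
      subst hx hy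
      by_cases hz : z = "/"
      · -- $ cd /
        subst hz
        rw [pv_stepA_cdroot c path d hsp, pv_stepB_cdroot c _ hsp]
        rw [pv_pre_cdroot c _ hsp] at hpre
        have hst' : st' = (path.take 1, d.keys) := Option.some_injective _ hpre.symm
        have hslice : PySem.List.slice path none (some 1) = path.take 1 := by
          rw [show (1 : Int) = ((1 : Nat) : Int) by norm_num, PySem.List.slice_to_natCast]
        obtain ⟨hp1, hp2, hp3, hp4, hp5⟩ := pv_pop_spec pend path d' hlen hnd hnz
        refine ⟨?_, ?_, ?_⟩
        · show (pop_to_root (path, pend, d')).1 = PySem.List.slice path none (some 1)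
          rw [hp1, hslice]
        · show st' = (PySem.List.slice path none (some 1), d.keys)
          rw [hst', hslice]
        · show PVInv (PySem.List.slice path none (some 1)) d
            (pop_to_root (path, pend, d')).2.2 (pop_to_root (path, pend, d')).2.1
          rw [hslice, ← hp1]
          refine ⟨hp2.symm ▸ rfl, by rw [hp3]; exact hkeys, by rw [hp3]; exact hnd, ?_, ?_⟩
          · intro k hk hp0
            obtain ⟨he, hm⟩ := hp5 k hk
            rw [hp3]
            exact hnz k hm (by rw [← he]; exact hp0)
          · intro k
            rw [hval k, ← hp4 k]
      · by_cases hz2 : z = ".."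
        · -- $ cd ..
          subst hz2
          rw [pv_stepA_cdpop c path d hsp, pv_stepB_cdpop c _ hsp]
          rw [pv_pre_cdpop c _ hsp] at hpre
          have hne : path ≠ [] := by
            intro h0
            rw [if_pos h0] at hpre
            cases hpre
          have hst' : st' = (path.dropLast, d.keys) := by
            rw [if_neg hne] at hpre
            exact Option.some_injective _ hpre.symm
          obtain ⟨s, rest, hpend⟩ : ∃ s rest, pend = s :: rest := by
            cases pend with
            | nil =>
              exfalso
              apply hne
              exact List.length_eq_zero_iff.mp (by simpa using hlen.symm)
            | cons s rest => exact ⟨s, rest, rfl⟩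
          subst hpend
          have hclose : close_top (path, s :: rest, d') =
              (path.dropLast, bump rest s,
                if s ≠ 0 then
                  d'.modify (pvK path) 0 (· + s)
                else d') := rfl
          rw [hclose]
          have hcons := pv_stack_cons path s rest hne
          have hrevc := pv_rev_levelKeys_cons path hne
          have hpwc : (pvK path :: (pvLevelKeys path.dropLast).reverse).Pairwise
              (fun a b => b.toList.length < a.toList.length) := by
            rw [← hrevc]; exact pv_rev_pairwise path
          have hlen' : rest.length = path.dropLast.length := by
            simp at hlen ⊢; omega
          have hmap' : (pvStack path.dropLast rest).map Prod.fst =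
              (pvLevelKeys path.dropLast).reverse := pv_stack_map_fst _ _ hlen'
          have hnotmem : ∀ k ∈ (pvStack path.dropLast rest).map Prod.fst, k ≠ pvK path := by
            intro k hk
            rw [hmap'] at hk
            intro he
            subst he
            have := (List.pairwise_cons.mp hpwc).1 _ hk
            omega
          have hd'' : (if s ≠ 0 then
              d'.modify (pvK path) 0 (· + s)
              else d').keys = d'.keys := by
            by_cases hs : s = 0
            · simp [hs]
            · rw [if_pos hs, PySem.Dict.keys_modify,
                PySem.Dict.keys_insert_of_contains]
              rw [PySem.Dict.contains_iff_mem_keys]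
              apply hnz (pvK path)
              · rw [hmapfst, hrevc]; exact List.mem_cons_self
              · rw [hcons]
                simp only [pendOf, if_pos rfl, zero_add]
                exact hs
          have hzip : pvStack path.dropLast (bump rest s) =
              bumpP (pvStack path.dropLast rest) s := pv_zip_bump _ _ _
          refine ⟨rfl, by rw [hst'], ?_⟩
          refine ⟨by simpa using hlen', by rw [hd'']; exact hkeys, by rw [hd'']; exact hnd,
            ?_, ?_⟩
          · intro k hk hp0
            rw [hzip, pv_map_fst_bumpP] at hk
            rw [hzip, pv_pend_bump, zero_add] at hp0
            rw [hd'']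
            apply hnz k
            · rw [hmapfst, hrevc, ← hmap']
              exact List.mem_cons_of_mem _ hk
            · rw [hcons]
              simp only [pendOf, if_neg (hnotmem k hk), zero_add]
              exact hp0
          · intro k
            rw [hval k, hzip, pv_pend_bump, zero_add, hcons]
            by_cases hk : k = pvK path
            · subst hk
              simp only [pendOf, if_pos rfl, zero_add]
              rw [pv_pendOf_not_mem _ _ _ (fun hm => (hnotmem _ hm) rfl)]
              by_cases hs : s = 0
              · simp [hs]
              · rw [if_pos hs, PySem.Dict.getD_modify, if_pos rfl]
                push_cast
                simp
            · simp only [pendOf, if_neg hk, zero_add]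
              by_cases hs : s = 0
              · simp [hs]
              · rw [if_pos hs, PySem.Dict.getD_modify, if_neg hk]
        · -- $ cd <folder>
          rw [pv_stepA_cdfold c z path d hsp hz hz2, pv_stepB_cdfold c z path pend d' hsp hz hz2]
          rw [pv_pre_cdfold c z _ hsp hz hz2] at hpre
          have hq : path_to_string path z = pvK path ++ z ++ "/" := pv_pts path z
          by_cases hc : d.contains (path_to_string path z) = true
          · rw [if_pos hc, if_pos ((hcont _).symm.trans hc)]
            rw [if_pos (by rw [hcontK, ← hq]; exact hc)] at hpre
            have hst' : st' = (path ++ [z], d.keys) := Option.some_injective _ hpre.symm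
            have hnew : pvStack (path ++ [z]) (0 :: pend) =
                (pvK (path ++ [z]), 0) :: pvStack path pend := by
              rw [pv_stack_cons _ _ _ (by simp), List.dropLast_concat]
            have hnotmem : pvK (path ++ [z]) ∉ (pvStack path pend).map Prod.fst := by
              rw [hmapfst]
              cases hp : path with
              | nil =>
                subst hp
                simp [pvLevelKeys]
              | cons p0 pt =>
                rw [← hp, pv_rev_levelKeys_cons path (by rw [hp]; simp)]
                apply pv_longer_not_mem
                · rw [← pv_rev_levelKeys_cons path (by rw [hp]; simp)]
                  exact pv_rev_pairwise path
                · rw [pv_pvK_append path z (by rw [hp]; simp), pv_len_append3]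
                  omega
            have hpend_new : ∀ k, pendOf 0 (pvStack (path ++ [z]) (0 :: pend)) k =
                pendOf 0 (pvStack path pend) k := by
              intro k
              rw [hnew]
              by_cases hk : k = pvK (path ++ [z])
              · rw [hk]
                simp only [pendOf, if_pos rfl, add_zero]
                rw [pv_pendOf_not_mem _ _ _ hnotmem]
                simp
              · simp only [pendOf, if_neg hk, zero_add, add_zero]
            refine ⟨rfl, by rw [hst'], ?_⟩
            refine ⟨by simpa using hlen, hkeys, hnd, ?_, ?_⟩
            · intro k hk hp0
              rw [hpend_new k] at hp0
              rw [hnew, List.map_cons] at hk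
              rcases List.mem_cons.mp hk with hh | hh
              · exfalso
                apply hp0
                rw [pv_pendOf_not_mem _ _ _ (hh ▸ hnotmem)]
              · exact hnz k hh hp0
            · intro k
              rw [hpend_new k]
              exact hval k
          · rw [if_neg hc, if_neg (fun hcc => hc ((hcont _).trans hcc))]
            rw [if_neg (by rw [hcontK, ← hq]; simpa using hc)] at hpre
            exact ⟨rfl, (Option.some_injective _ hpre).symm, hInv⟩
    · rw [pv_stepA_cd3other c x y z _ hsp hcd, pv_stepB_cd3other c x y z _ hsp hcd]
      rw [pv_pre_cd3other c x y z _ hsp hcd] at hpre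
      exact ⟨rfl, (Option.some_injective _ hpre).symm, hInv⟩
  · -- four or more tokens
    rw [pv_stepA_many c x y z _ _ _ hsp, pv_stepB_many c x y z _ _ _ hsp]
    rw [pv_pre_many c x y z _ _ _ hsp] at hpre
    exact ⟨rfl, (Option.some_injective _ hpre).symm, hInv⟩

theorem pv_fold_inv :
    ∀ (cmds : List String) (path : List String) (d d' : PySem.Dict String Int)
      (pend : List Int) (stFin : List String × List String),
      preRun (path, d.keys) cmds = some stFin →
      PVInv path d d' pend →
      (cmds.foldl stepB (path, pend, d')).1 = (cmds.foldl stepA (path, d)).1 ∧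
      PVInv (cmds.foldl stepA (path, d)).1 (cmds.foldl stepA (path, d)).2
        (cmds.foldl stepB (path, pend, d')).2.2 (cmds.foldl stepB (path, pend, d')).2.1 := by
  intro cmds
  induction cmds with
  | nil =>
    intro path d d' pend stFin _ h
    exact ⟨rfl, h⟩
  | cons c t ih =>
    intro path d d' pend stFin hrun h
    obtain ⟨st', hstep, hrest⟩ : ∃ st', preStep (path, d.keys) c = some st' ∧
        preRun st' t = some stFin := by
      unfold preRun at hrun
      cases hps : preStep (path, d.keys) c with
      | none => rw [hps] at hrun; cases hrun
      | some st' => exact ⟨st', rfl, by rw [hps] at hrun; exact hrun⟩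
    obtain ⟨hB1, hst', hinv⟩ := pv_step_inv c path d d' pend st' hstep h
    -- rebuild B's state with A's (equal) path component so the IH applies
    have hBeq : stepB (path, pend, d') c = ((stepA (path, d) c).1,
        (stepB (path, pend, d') c).2.1, (stepB (path, pend, d') c).2.2) := by
      rw [← hB1]
    simp only [List.foldl_cons]
    rw [hBeq]
    exact ih (stepA (path, d) c).1 (stepA (path, d) c).2
      (stepB (path, pend, d') c).2.2 (stepB (path, pend, d') c).2.1 stFin
      (by rw [← hst']; exact hrest) hinv

theorem pv_init_inv :
    PVInv [ROOT_FOLDER] (PySem.Dict.ofList [(ROOT_FOLDER ++ "/", 0)])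
      (PySem.Dict.ofList [(ROOT_FOLDER ++ "/", 0)]) [0] := by
  have hstack : pvStack [ROOT_FOLDER] [0] = [("home/", 0)] := by decide
  refine ⟨rfl, rfl, by decide, ?_, ?_⟩
  · intro k hk hp0
    exfalso
    apply hp0
    rw [hstack]
    rw [hstack] at hk
    simp at hk
    subst hk
    decide
  · intro k
    rw [hstack]
    have : pendOf 0 [("home/", 0)] k = 0 := by
      simp [pendOf]
    rw [this, add_zero]

theorem pv_final (path : List String) (d d' : PySem.Dict String Int) (pend : List Int)
    (h : PVInv path d d' pend) :
    d.items = (flush_all (path, pend, d')).2.2.items := by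
  obtain ⟨hlen, hkeys, hnd, hnz, hval⟩ := h
  obtain ⟨hfk, hfv⟩ := pv_flush_spec pend path d' hlen hnd hnz
  have hndA : d.keys.Nodup := by rw [hkeys]; exact hnd
  have hndF : (flush_all (path, pend, d')).2.2.keys.Nodup := by rw [hfk]; exact hnd
  rw [PySem.Dict.items_eq_map_keys d hndA 0,
    PySem.Dict.items_eq_map_keys _ hndF 0, hfk, ← hkeys]
  apply List.map_congr_left
  intro k _
  simp only [Prod.mk.injEq]
  exact ⟨trivial, by rw [hfv k, ← hval k]⟩

-- ===== VERDICT (by name: the statement is the Claim_ definition above) =====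
theorem get_folder_structure_spec : Claim_equal_get_folder_structure := by
  intro commands _ hpre
  unfold Spec_get_folder_structure get_folder_structure get_folder_structure_alt
  unfold Pre_get_folder_structure at hpre
  obtain ⟨stFin, hrun⟩ := Option.isSome_iff_exists.mp hpre
  have hkeys0 : (PySem.Dict.ofList [(ROOT_FOLDER ++ "/", (0 : Int))]).keys = ["home/"] := by
    decide
  have hroot : (["home"], ["home/"]) =
      (([ROOT_FOLDER] : List String),
        (PySem.Dict.ofList [(ROOT_FOLDER ++ "/", (0 : Int))]).keys) := by
    rw [hkeys0]
    rfl
  rw [hroot] at hrun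
  obtain ⟨hB1, hinv⟩ := pv_fold_inv commands [ROOT_FOLDER]
    (PySem.Dict.ofList [(ROOT_FOLDER ++ "/", 0)])
    (PySem.Dict.ofList [(ROOT_FOLDER ++ "/", 0)]) [0] stFin hrun pv_init_inv
  have hfin := pv_final _ _ _ _ hinv
  have harg : commands.foldl stepB
      ([ROOT_FOLDER], [0], PySem.Dict.ofList [(ROOT_FOLDER ++ "/", 0)]) =
      ((commands.foldl stepA
          ([ROOT_FOLDER], PySem.Dict.ofList [(ROOT_FOLDER ++ "/", 0)])).1,
        (commands.foldl stepB
          ([ROOT_FOLDER], [0], PySem.Dict.ofList [(ROOT_FOLDER ++ "/", 0)])).2.1,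
        (commands.foldl stepB
          ([ROOT_FOLDER], [0], PySem.Dict.ofList [(ROOT_FOLDER ++ "/", 0)])).2.2) := by
    rw [← hB1]
  rw [harg]
  exact hfin
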